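-- pv_equiv track=rewrite | github.com/MuriloCarlos1567/viper | viper/state.py | _normalize_library_links
-- ===== SOURCE A (Python) =====
-- def _normalize_library_links(raw: dict[str, list[dict[str, str]]]) -> dict[str, list[dict[str, str]]]:
--     normalized: dict[str, list[dict[str, str]]] = {}
--     if not isinstance(raw, dict):
--         return normalized
--
--     for api_repo, links in raw.items():
--         api_key = str(api_repo).strip()
--         if not api_key or not isinstance(links, list):
--             continue
--
--         seen: set[tuple[str, str]] = set()
--         cleaned: list[dict[str, str]] = []
--         for item in links:
--             if not isinstance(item, dict):
--                 continue
--             lib_repo = str(item.get("lib_repo", "")).strip()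
--             subpath = _normalize_subpath(str(item.get("subpath", "src")))
--             if not lib_repo:
--                 continue
--             key = (lib_repo, subpath)
--             if key in seen:
--                 continue
--             seen.add(key)
--             cleaned.append({"lib_repo": lib_repo, "subpath": subpath})
--
--         if cleaned:
--             cleaned.sort(key=lambda link: (link["lib_repo"], link["subpath"]))
--             normalized[api_key] = cleaned
--
--     return dict(sorted(normalized.items()))
--
-- def _normalize_subpath(raw: str) -> str:
--     value = raw.strip().replace("\\", "/")
--     if not value:
--         return "src"
--     if value in (".", "./"):
--         return "."
--     value = value.strip("/")
--     parts = [part for part in value.split("/") if part and part != "."]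
--     if not parts:
--         return "."
--     return "/".join(parts)
-- ===== SOURCE B (Python) =====
-- def _normalize_subpath(raw: str) -> str:
--     value = raw.strip().replace("\\", "/")
--     if not value:
--         return "src"
--     if value in (".", "./"):
--         return "."
--     value = value.strip("/")
--     parts = [part for part in value.split("/") if part and part != "."]
--     if not parts:
--         return "."
--     return "/".join(parts)
--
--
-- def _normalize_library_links(raw: dict[str, list[dict[str, str]]]) -> dict[str, list[dict[str, str]]]:
--     normalized: dict[str, list[dict[str, str]]] = {}
--     if not isinstance(raw, dict):
--         return normalized
--
--     for api_repo, links in raw.items():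
--         api_key = str(api_repo).strip()
--         if not api_key or not isinstance(links, list):
--             continue
--
--         # Collect every candidate (lib_repo, subpath) pair with no seen-set, sort
--         # them, then dedupe by a single adjacency pass over the sorted order.
--         pairs = sorted(
--             (str(item.get("lib_repo", "")).strip(),
--              _normalize_subpath(str(item.get("subpath", "src"))))
--             for item in links
--             if isinstance(item, dict)
--         )
--         cleaned: list[dict[str, str]] = []
--         for lib_repo, subpath in pairs:
--             if lib_repo and (
--                 not cleaned
--                 or (cleaned[-1]["lib_repo"], cleaned[-1]["subpath"]) != (lib_repo, subpath)
--             ):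
--                 cleaned.append({"lib_repo": lib_repo, "subpath": subpath})
--
--         if cleaned:
--             normalized[api_key] = cleaned
--
--     return dict(sorted(normalized.items()))
-- ===== Notes on version B (the rewrite author's own statement) =====
-- stated objective: alternative
-- what changed: Per-key dedup switched from a hash-set membership filter followed by a sort to collecting all candidate (lib_repo, subpath) pairs, sorting them, and removing duplicates (and empty lib_repos) in a single adjacency pass over the sorted order.
import Mathlib
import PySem

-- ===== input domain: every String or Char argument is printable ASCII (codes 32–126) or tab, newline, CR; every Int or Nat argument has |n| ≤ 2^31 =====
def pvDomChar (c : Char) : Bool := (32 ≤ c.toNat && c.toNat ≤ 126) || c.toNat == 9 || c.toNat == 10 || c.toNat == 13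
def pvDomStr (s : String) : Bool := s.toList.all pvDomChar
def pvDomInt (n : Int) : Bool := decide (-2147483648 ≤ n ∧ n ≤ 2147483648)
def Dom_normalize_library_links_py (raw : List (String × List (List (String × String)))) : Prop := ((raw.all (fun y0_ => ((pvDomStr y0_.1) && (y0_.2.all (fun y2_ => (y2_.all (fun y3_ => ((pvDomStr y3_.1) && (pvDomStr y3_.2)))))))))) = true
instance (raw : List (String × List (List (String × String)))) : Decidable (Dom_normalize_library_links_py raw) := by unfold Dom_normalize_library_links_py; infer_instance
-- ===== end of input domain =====

-- B replaces A's per-key hash-set dedup-then-sort with sort-all-candidates then one adjacency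
-- dedup pass (objective: alternative algorithm of the same cost).


-- ===== PORT A =====
-- shared helper `_normalize_subpath` (identical in Source A and Source B)
def normsub (raw : String) : String :=
  let value := PySem.Str.replace (PySem.Str.strip raw) "\\" "/"
  if value = "" then "src"
  else if value = "." ∨ value = "./" then "."
  else
    let value2 := PySem.Str.stripChars value "/"
    -- sep is the non-empty literal "/", so split? is always `some`
    let parts := ((PySem.Str.split? value2 "/").getD []).filter (fun part => part != "" && part != ".")
    if parts = [] then "." else PySem.Str.join "/" parts

-- the dict {"lib_repo": l, "subpath": s}
def mkLink (l s : String) : List (String × String) := [("lib_repo", l), ("subpath", s)]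

-- read back link["lib_repo"], link["subpath"] (both keys are always present in cleaned links)
def keyPair (link : List (String × String)) : String × String :=
  ((PySem.Dict.mk link).getD "lib_repo" "", (PySem.Dict.mk link).getD "subpath" "")

-- Python's sort key `(link["lib_repo"], link["subpath"])`: tuple comparison is lexicographic
def linkSortKey (link : List (String × String)) : String ×ₗ String := toLex (keyPair link)

-- inner loop body of A (state: the `seen` set and the `cleaned` list)
def stepA (st : PySem.Set (String × String) × List (List (String × String)))
    (item : List (String × String)) :
    PySem.Set (String × String) × List (List (String × String)) :=
  let d := PySem.Dict.ofList item
  let lib_repo := PySem.Str.strip (d.getD "lib_repo" "")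
  let subpath := normsub (d.getD "subpath" "src")
  if lib_repo = "" then st
  else if PySem.Set.contains st.1 (lib_repo, subpath) then st
  else (PySem.Set.add st.1 (lib_repo, subpath), st.2 ++ [mkLink lib_repo subpath])

-- body of A's outer `for api_repo, links in raw.items()` loop
def outerA (normalized : PySem.Dict String (List (List (String × String))))
    (entry : String × List (List (String × String))) :
    PySem.Dict String (List (List (String × String))) :=
  let api_key := PySem.Str.strip entry.1
  if api_key = "" then normalized
  else
    let st := entry.2.foldl stepA (PySem.Set.empty, [])
    if st.2 = [] then normalized
    else normalized.insert api_key (PySem.List.sorted st.2 linkSortKey)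

-- `dict(sorted(normalized.items()))`: the keys are unique, so the tuple comparison never
-- reaches the values — sorting by the key alone is exact.
def normalize_library_links_py (raw : List (String × List (List (String × String)))) : List (String × List (List (String × String))) :=
  ((PySem.Dict.ofList raw).items.foldl outerA PySem.Dict.empty).items
    |> (PySem.List.sorted · (fun p => p.1))

-- ===== PORT B =====
-- the candidate (lib_repo, subpath) pair of one raw item
def itemPair (item : List (String × String)) : String × String :=
  let d := PySem.Dict.ofList item
  (PySem.Str.strip (d.getD "lib_repo" ""), normsub (d.getD "subpath" "src"))

-- adjacency pass: keep p when lib_repo ≠ "" and cleaned[-1] does not already carry p's key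
def stepB (cleaned : List (List (String × String))) (p : String × String) :
    List (List (String × String)) :=
  if p.1 ≠ "" ∧ (PySem.List.pyGet? cleaned (-1)).map keyPair ≠ some p
  then cleaned ++ [mkLink p.1 p.2] else cleaned

def outerB (normalized : PySem.Dict String (List (List (String × String))))
    (entry : String × List (List (String × String))) :
    PySem.Dict String (List (List (String × String))) :=
  let api_key := PySem.Str.strip entry.1
  if api_key = "" then normalized
  else
    -- sorted(...) of tuples: lexicographic comparison
    let pairs := PySem.List.sorted (entry.2.map itemPair) (fun p => (toLex p : String ×ₗ String))
    let cleaned := pairs.foldl stepB []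
    if cleaned = [] then normalized
    else normalized.insert api_key cleaned

def normalize_library_links_py_alt (raw : List (String × List (List (String × String)))) : List (String × List (List (String × String))) :=
  ((PySem.Dict.ofList raw).items.foldl outerB PySem.Dict.empty).items
    |> (PySem.List.sorted · (fun p => p.1))

-- ===== PRECONDITION & SPEC =====
def Spec_normalize_library_links_py (raw : List (String × List (List (String × String)))) (out : List (String × List (List (String × String)))) : Prop := out = normalize_library_links_py_alt raw
instance (raw : List (String × List (List (String × String)))) (out : List (String × List (List (String × String)))) : Decidable (Spec_normalize_library_links_py raw out) := by unfold Spec_normalize_library_links_py; infer_instance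

-- ===== CLAIM (what is proved, stated in full; the proofs are below) =====
def Claim_equal_normalize_library_links_py : Prop := ∀ (raw : List (String × List (List (String × String)))), Dom_normalize_library_links_py raw → Spec_normalize_library_links_py raw (normalize_library_links_py raw)

-- ===== LEMMAS AND PROOFS =====

-- pair-level analogue of stepA (the `cleaned` list holds the pairs instead of the dicts)
def gA (st : PySem.Set (String × String) × List (String × String)) (p : String × String) :
    PySem.Set (String × String) × List (String × String) :=
  if p.1 = "" then st
  else if PySem.Set.contains st.1 p then st
  else (PySem.Set.add st.1 p, st.2 ++ [p])

-- pair-level analogue of stepB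
def gB (acc : List (String × String)) (p : String × String) : List (String × String) :=
  if p.1 ≠ "" ∧ acc.getLast? ≠ some p then acc ++ [p] else acc

def mk' (p : String × String) : List (String × String) := mkLink p.1 p.2

theorem keyPair_mk' (p : String × String) : keyPair (mk' p) = p := rfl

theorem insertBy_cons {α : Type} (bf : α → α → Bool) (x y : α) (ys : List α) :
    PySem.List.insertBy bf x (y :: ys) = if bf x y then x :: y :: ys else y :: PySem.List.insertBy bf x ys := by
  simp [PySem.List.insertBy]

theorem insertBy_map_gen {A B : Type} (f : A → B) (bfa : A → A → Bool) (bfb : B → B → Bool)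
    (hf : ∀ a c, bfb (f a) (f c) = bfa a c) (p : A) (acc : List A) :
    PySem.List.insertBy bfb (f p) (acc.map f) = (PySem.List.insertBy bfa p acc).map f := by
  induction acc with
  | nil => rfl
  | cons y ys ih =>
    rw [List.map_cons, insertBy_cons, insertBy_cons, hf p y]
    split_ifs with h
    · simp
    · rw [List.map_cons, ih]

theorem sorted_map_mk' (l : List (String × String)) :
    PySem.List.sorted (l.map mk') linkSortKey
      = (PySem.List.sorted l (fun p => (toLex p : String ×ₗ String))).map mk' := by
  rw [PySem.List.sorted_eq_foldl_insertBy, PySem.List.sorted_eq_foldl_insertBy]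
  have main : ∀ (l : List (String × String)) (acc : List (String × String)),
      (l.map mk').foldl (fun a x => PySem.List.insertBy (fun a b => decide (linkSortKey a < linkSortKey b)) x a) (acc.map mk')
        = (l.foldl (fun a x => PySem.List.insertBy (fun a b => decide ((toLex a : String ×ₗ String) < toLex b)) x a) acc).map mk' := by
    intro l
    induction l with
    | nil => intro acc; rfl
    | cons x xs ih => intro acc; rw [List.map_cons, List.foldl_cons, List.foldl_cons, insertBy_map_gen mk' (fun a b => decide ((toLex a : String ×ₗ String) < toLex b)) (fun a b => decide (linkSortKey a < linkSortKey b)) (fun a c => rfl) x acc, ih]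
  simpa using main l []

-- stepA over items = gA over their pairs, with the cleaned dicts the image of the cleaned pairs
theorem foldl_stepA_lift (items : List (List (String × String)))
    (s : PySem.Set (String × String)) (acc : List (String × String)) :
    items.foldl stepA (s, acc.map mk')
      = ((items.foldl (fun st x => gA st (itemPair x)) (s, acc)).1,
         (items.foldl (fun st x => gA st (itemPair x)) (s, acc)).2.map mk') := by
  induction items generalizing s acc with
  | nil => rfl
  | cons item t ih =>
    have hstep : stepA (s, acc.map mk') item
        = ((gA (s, acc) (itemPair item)).1, (gA (s, acc) (itemPair item)).2.map mk') := by
      simp only [stepA, gA, itemPair]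
      split_ifs <;> simp [mk', mkLink]
    rw [List.foldl_cons, hstep, List.foldl_cons]
    simpa using ih (gA (s, acc) (itemPair item)).1 (gA (s, acc) (itemPair item)).2

theorem foldl_stepB_lift (ps : List (String × String)) (acc : List (String × String)) :
    ps.foldl stepB (acc.map mk') = (ps.foldl gB acc).map mk' := by
  induction ps generalizing acc with
  | nil => rfl
  | cons p t ih =>
    have hstep : stepB (acc.map mk') p = (gB acc p).map mk' := by
      simp only [stepB, gB, PySem.List.pyGet?_neg_one, List.getLast?_map, Option.map_map,
        Function.comp_def, keyPair_mk', Option.map_id']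
      split_ifs <;> simp [mk', mkLink]
    rw [List.foldl_cons, hstep, List.foldl_cons, ih]

-- A's dedup output characterised: nodup, nonempty libs, membership
theorem gA_props (ps : List (String × String)) (s : PySem.Set (String × String))
    (acc : List (String × String))
    (hs : ∀ q, PySem.Set.contains s q = true ↔ q ∈ acc)
    (hnd : acc.Nodup) (hne : ∀ q ∈ acc, q.1 ≠ "") :
    (ps.foldl gA (s, acc)).2.Nodup ∧
    (∀ q ∈ (ps.foldl gA (s, acc)).2, q.1 ≠ "") ∧
    (∀ q, q ∈ (ps.foldl gA (s, acc)).2 ↔ q ∈ acc ∨ (q ∈ ps ∧ q.1 ≠ "")) := by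
  induction ps generalizing s acc with
  | nil => exact ⟨hnd, hne, by simp⟩
  | cons p t ih =>
    rw [List.foldl_cons]
    by_cases hp : p.1 = ""
    · rw [show gA (s, acc) p = (s, acc) from by simp [gA, hp]]
      obtain ⟨h1, h2, h3⟩ := ih s acc hs hnd hne
      refine ⟨h1, h2, fun q => ?_⟩
      rw [h3]
      constructor
      · rintro (h | ⟨h, hq⟩)
        · exact Or.inl h
        · exact Or.inr ⟨List.mem_cons_of_mem _ h, hq⟩
      · rintro (h | ⟨h, hq⟩)
        · exact Or.inl h
        · rcases List.mem_cons.mp h with rfl | h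
          · exact absurd hp hq
          · exact Or.inr ⟨h, hq⟩
    · by_cases hc : PySem.Set.contains s p
      · rw [show gA (s, acc) p = (s, acc) from by unfold gA; rw [if_neg hp, if_pos hc]]
        obtain ⟨h1, h2, h3⟩ := ih s acc hs hnd hne
        have hpacc : p ∈ acc := (hs p).mp hc
        refine ⟨h1, h2, fun q => ?_⟩
        rw [h3]
        constructor
        · rintro (h | ⟨h, hq⟩)
          · exact Or.inl h
          · exact Or.inr ⟨List.mem_cons_of_mem _ h, hq⟩
        · rintro (h | ⟨h, hq⟩)
          · exact Or.inl h
          · rcases List.mem_cons.mp h with rfl | h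
            · exact Or.inl hpacc
            · exact Or.inr ⟨h, hq⟩
      · rw [show gA (s, acc) p = (PySem.Set.add s p, acc ++ [p]) from by unfold gA; rw [if_neg hp, if_neg hc]]
        have hpnacc : p ∉ acc := fun h => hc (by rw [hs p]; exact h)
        have hs' : ∀ q, PySem.Set.contains (PySem.Set.add s p) q = true ↔ q ∈ acc ++ [p] := by
          intro q
          constructor
          · intro h
            have : q ∈ PySem.Set.add s p := by
              simpa [PySem.Set.contains, List.contains_iff_mem] using h
            rcases (PySem.Set.mem_add s p q).mp this with h | rfl
            · exact List.mem_append_left _ ((hs q).mp (by simpa [PySem.Set.contains, List.contains_iff_mem] using h))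
            · simp
          · intro h
            have : q ∈ PySem.Set.add s p := by
              rcases List.mem_append.mp h with h | h
              · exact (PySem.Set.mem_add s p q).mpr (Or.inl (by
                  have := (hs q).mpr h
                  simpa [PySem.Set.contains, List.contains_iff_mem] using this))
              · exact (PySem.Set.mem_add s p q).mpr (Or.inr (by simpa using h))
            simpa [PySem.Set.contains, List.contains_iff_mem] using this
        have hnd' : (acc ++ [p]).Nodup := by
          refine List.Nodup.append hnd (List.nodup_singleton p) ?_
          intro a ha hb
          simp only [List.mem_singleton] at hb
          subst hb
          exact hpnacc ha
        have hne' : ∀ q ∈ acc ++ [p], q.1 ≠ "" := by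
          intro q hq
          rcases List.mem_append.mp hq with h | h
          · exact hne q h
          · simp at h; subst h; exact hp
        obtain ⟨h1, h2, h3⟩ := ih (PySem.Set.add s p) (acc ++ [p]) hs' hnd' hne'
        refine ⟨h1, h2, fun q => ?_⟩
        rw [h3]
        constructor
        · rintro (h | ⟨h, hq⟩)
          · rcases List.mem_append.mp h with h | h
            · exact Or.inl h
            · simp at h; subst h; exact Or.inr ⟨by simp, hp⟩
          · exact Or.inr ⟨List.mem_cons_of_mem _ h, hq⟩
        · rintro (h | ⟨h, hq⟩)
          · exact Or.inl (List.mem_append_left _ h)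
          · rcases List.mem_cons.mp h with rfl | h
            · exact Or.inl (List.mem_append_right _ (by simp))
            · exact Or.inr ⟨h, hq⟩

theorem le_getLast_of_pairwise_lt (acc : List (String × String)) (m : String × String)
    (hacc : acc.Pairwise (fun a b => (toLex a : String ×ₗ String) < toLex b))
    (hm : acc.getLast? = some m) :
    ∀ a ∈ acc, (toLex a : String ×ₗ String) ≤ toLex m := by
  obtain ⟨ys, rfl⟩ := List.getLast?_eq_some_iff.mp hm
  rw [List.pairwise_append] at hacc
  intro a ha
  rcases List.mem_append.mp ha with h | h
  · exact le_of_lt (hacc.2.2 a h m (by simp))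
  · simp only [List.mem_singleton] at h; subst h; exact le_refl _

-- B's adjacency pass over a ≤-sorted list: strictly increasing output, same membership
theorem gB_props (xs : List (String × String)) (acc : List (String × String))
    (hxs : xs.Pairwise (fun a b => (toLex a : String ×ₗ String) ≤ toLex b))
    (hacc : acc.Pairwise (fun a b => (toLex a : String ×ₗ String) < toLex b))
    (hne : ∀ a ∈ acc, a.1 ≠ "")
    (hle : ∀ a ∈ acc, ∀ x ∈ xs, (toLex a : String ×ₗ String) ≤ toLex x) :
    (xs.foldl gB acc).Pairwise (fun a b => (toLex a : String ×ₗ String) < toLex b) ∧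
    (∀ a ∈ xs.foldl gB acc, a.1 ≠ "") ∧
    (∀ q, q ∈ xs.foldl gB acc ↔ q ∈ acc ∨ (q ∈ xs ∧ q.1 ≠ "")) := by
  induction xs generalizing acc with
  | nil => exact ⟨hacc, hne, by simp⟩
  | cons p t ih =>
    rw [List.foldl_cons]
    rw [List.pairwise_cons] at hxs
    obtain ⟨hple, ht⟩ := hxs
    by_cases hcond : p.1 ≠ "" ∧ acc.getLast? ≠ some p
    · rw [show gB acc p = acc ++ [p] from by unfold gB; rw [if_pos hcond]]
      obtain ⟨hp1, hlast⟩ := hcond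
      have hlt : ∀ a ∈ acc, (toLex a : String ×ₗ String) < toLex p := by
        intro a ha
        rcases lt_or_eq_of_le (hle a ha p (by simp)) with h | h
        · exact h
        · exfalso
          have haeq : a = p := toLex.injective h
          subst haeq
          have hanil : acc ≠ [] := List.ne_nil_of_mem ha
          obtain ⟨m, hm⟩ : ∃ m, acc.getLast? = some m := by
            cases h : acc.getLast? with
            | none => exact absurd (List.getLast?_eq_none_iff.mp h) hanil
            | some m => exact ⟨m, rfl⟩
          have h1 : (toLex a : String ×ₗ String) ≤ toLex m :=
            le_getLast_of_pairwise_lt acc m hacc hm a ha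
          have h2 : (toLex m : String ×ₗ String) ≤ toLex a :=
            hle m (List.mem_of_getLast? hm) a (by simp)
          have : m = a := toLex.injective (le_antisymm h2 h1)
          subst this
          exact hlast hm
      have hacc' : (acc ++ [p]).Pairwise (fun a b => (toLex a : String ×ₗ String) < toLex b) := by
        rw [List.pairwise_append]
        exact ⟨hacc, List.pairwise_singleton _ _, fun a ha b hb => by
          simp only [List.mem_singleton] at hb; subst hb; exact hlt a ha⟩
      have hne' : ∀ a ∈ acc ++ [p], a.1 ≠ "" := by
        intro a ha
        rcases List.mem_append.mp ha with h | h
        · exact hne a h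
        · simp only [List.mem_singleton] at h; subst h; exact hp1
      have hle' : ∀ a ∈ acc ++ [p], ∀ x ∈ t, (toLex a : String ×ₗ String) ≤ toLex x := by
        intro a ha x hx
        rcases List.mem_append.mp ha with h | h
        · exact hle a h x (List.mem_cons_of_mem _ hx)
        · simp only [List.mem_singleton] at h; subst h; exact hple x hx
      obtain ⟨h1, h2, h3⟩ := ih (acc ++ [p]) ht hacc' hne' hle'
      refine ⟨h1, h2, fun q => ?_⟩
      rw [h3]
      constructor
      · rintro (h | ⟨h, hq⟩)
        · rcases List.mem_append.mp h with h | h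
          · exact Or.inl h
          · simp only [List.mem_singleton] at h; subst h; exact Or.inr ⟨by simp, hp1⟩
        · exact Or.inr ⟨List.mem_cons_of_mem _ h, hq⟩
      · rintro (h | ⟨h, hq⟩)
        · exact Or.inl (List.mem_append_left _ h)
        · rcases List.mem_cons.mp h with rfl | h
          · exact Or.inl (List.mem_append_right _ (by simp))
          · exact Or.inr ⟨h, hq⟩
    · rw [show gB acc p = acc from by unfold gB; rw [if_neg hcond]]
      have hle'' : ∀ a ∈ acc, ∀ x ∈ t, (toLex a : String ×ₗ String) ≤ toLex x :=
        fun a ha x hx => hle a ha x (List.mem_cons_of_mem _ hx)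
      obtain ⟨h1, h2, h3⟩ := ih acc ht hacc hne hle''
      refine ⟨h1, h2, fun q => ?_⟩
      rw [h3]
      have hpcase : p.1 = "" ∨ p ∈ acc := by
        by_cases hp1 : p.1 = ""
        · exact Or.inl hp1
        · right
          have : acc.getLast? = some p := by
            by_contra hl
            exact hcond ⟨hp1, hl⟩
          exact List.mem_of_getLast? this
      constructor
      · rintro (h | ⟨h, hq⟩)
        · exact Or.inl h
        · exact Or.inr ⟨List.mem_cons_of_mem _ h, hq⟩
      · rintro (h | ⟨h, hq⟩)
        · exact Or.inl h
        · rcases List.mem_cons.mp h with rfl | h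
          · rcases hpcase with h' | h'
            · exact absurd h' hq
            · exact Or.inl h'
          · exact Or.inr ⟨h, hq⟩

-- the heart: sort(dedup-first(ps)) = adjacency-dedup(sort(ps))
theorem main_pairs (ps : List (String × String)) :
    PySem.List.sorted ((ps.foldl gA (PySem.Set.empty, [])).2)
        (fun p => (toLex p : String ×ₗ String))
      = (PySem.List.sorted ps (fun p => (toLex p : String ×ₗ String))).foldl gB [] := by
  obtain ⟨hnd, hne, hmem⟩ := gA_props ps PySem.Set.empty []
    (by intro q; simp [PySem.Set.contains, PySem.Set.empty]) List.nodup_nil (by simp)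
  obtain ⟨hpw, hne2, hmem2⟩ := gB_props
    (PySem.List.sorted ps (fun p => (toLex p : String ×ₗ String))) []
    (PySem.List.sorted_pairwise ps _) List.Pairwise.nil (by simp) (by simp)
  refine PySem.List.sorted_eq_of_perm_of_pairwise_lt _ _ _ ?_ hpw
  have hndB : ((PySem.List.sorted ps (fun p => (toLex p : String ×ₗ String))).foldl gB []).Nodup :=
    hpw.imp (fun {a b} h he => by subst he; exact lt_irrefl _ h)
  rw [List.perm_ext_iff_of_nodup hndB hnd]
  intro q
  rw [hmem2 q, hmem q, PySem.List.mem_sorted]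

-- per-entry cleaned lists agree (A after its sort = B)
theorem cleaned_eq (links : List (List (String × String))) :
    PySem.List.sorted (links.foldl stepA (PySem.Set.empty, [])).2 linkSortKey
      = (PySem.List.sorted (links.map itemPair) (fun p => (toLex p : String ×ₗ String))).foldl stepB [] := by
  have h0 : links.foldl stepA (PySem.Set.empty, ([] : List (List (String × String))))
      = links.foldl stepA (PySem.Set.empty, ([] : List (String × String)).map mk') := rfl
  rw [h0, foldl_stepA_lift, ← List.foldl_map (f := itemPair) (g := gA), sorted_map_mk',
    main_pairs, ← foldl_stepB_lift]
  rfl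

theorem outerA_eq_outerB : outerA = outerB := by
  funext normalized entry
  simp only [outerA, outerB]
  by_cases hk : PySem.Str.strip entry.1 = ""
  · simp [hk]
  · simp only [if_neg hk]
    have h := cleaned_eq entry.2
    by_cases hnil : (entry.2.foldl stepA (PySem.Set.empty, [])).2 = []
    · have hnil' : (PySem.List.sorted (entry.2.map itemPair)
          (fun p => (toLex p : String ×ₗ String))).foldl stepB [] = [] := by
        rw [← h, hnil]
        rfl
      rw [if_pos hnil, if_pos hnil']
    · have hnil' : ¬ (PySem.List.sorted (entry.2.map itemPair)
          (fun p => (toLex p : String ×ₗ String))).foldl stepB [] = [] := by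
        rw [← h]
        intro hc
        exact hnil ((PySem.List.sorted_eq_nil_iff _ _ _).mp hc)
      rw [if_neg hnil, if_neg hnil', ← h]

-- ===== VERDICT (by name: the statement is the Claim_ definition above) =====
theorem normalize_library_links_py_spec : Claim_equal_normalize_library_links_py := by
  intro raw _
  unfold Spec_normalize_library_links_py normalize_library_links_py normalize_library_links_py_alt
  rw [outerA_eq_outerB]
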